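-- pv_equiv track=rewrite | github.com/groverongo/r-dynamic-coloring | main/utils/check_multigraph.py | has_repeated_edges
-- ===== SOURCE A (Python) =====
-- def has_repeated_edges(adjacency_list: dict[int, list[int]]):
--     """
--     Check if a graph represented by an adjacency list has any repeated edges.
--     In an undirected graph, (u,v) and (v,u) are considered the same edge.
--
--     Args:
--         adjacency_list (dict): A dictionary where keys are vertices and values are lists of adjacent vertices.
--
--     Returns:
--         bool: True if there are repeated edges, False otherwise.
--     """
--     # For each vertex, track which neighbors we've seen
--     seen_neighbors = {v: set() for v in adjacency_list}
--
--     for vertex, neighbors in adjacency_list.items():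
--         for neighbor in neighbors:
--             # For undirected graphs, we only need to check in one direction
--             if vertex > neighbor:
--                 continue
--
--             if neighbor in seen_neighbors[vertex]:
--                 # Found a duplicate edge
--                 return True
--             seen_neighbors[vertex].add(neighbor)
--
--     return False
-- ===== SOURCE B (Python) =====
-- def has_repeated_edges(adjacency_list: dict[int, list[int]]):
--     edges = []
--     for vertex, neighbors in adjacency_list.items():
--         for neighbor in neighbors:
--             if vertex <= neighbor:
--                 edges.append((vertex, neighbor))
--     return len(edges) != len(set(edges))
-- ===== Notes on version B (the rewrite author's own statement) =====
-- stated objective: alternative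
-- what changed: Replaces the per-vertex seen-sets with early-exit membership tests by one flat collection pass that gathers all normalized forward edges and compares the list length with the number of distinct edges.
import Mathlib
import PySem

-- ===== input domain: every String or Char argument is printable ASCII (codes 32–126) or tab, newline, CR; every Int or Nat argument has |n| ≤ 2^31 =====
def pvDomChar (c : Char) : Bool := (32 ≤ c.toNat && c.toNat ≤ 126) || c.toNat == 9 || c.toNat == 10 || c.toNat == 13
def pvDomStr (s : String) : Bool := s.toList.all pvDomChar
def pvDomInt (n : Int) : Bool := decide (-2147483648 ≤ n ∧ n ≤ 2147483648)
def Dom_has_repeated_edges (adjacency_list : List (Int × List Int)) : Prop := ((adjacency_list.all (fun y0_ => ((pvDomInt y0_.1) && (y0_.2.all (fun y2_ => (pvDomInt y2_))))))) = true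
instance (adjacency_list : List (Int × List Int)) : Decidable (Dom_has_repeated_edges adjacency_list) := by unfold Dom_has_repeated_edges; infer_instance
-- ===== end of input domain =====

-- B replaces A's per-vertex seen-sets with early exit by one flat pass collecting all
-- normalized forward edges followed by a count-vs-distinct-count comparison (objective: alternative).

-- ===== PORT A =====
-- seen_neighbors = {v: set() for v in adjacency_list}
def pvInitA (adjacency_list : List (Int × List Int)) : PySem.Dict Int (PySem.Set Int) :=
  adjacency_list.foldl (fun d p => d.insert p.1 PySem.Set.empty) PySem.Dict.empty

-- inner 'for neighbor in neighbors' loop; 'none' models the early 'return True'.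
-- seen_neighbors[vertex] is read with getD: vertex is always a key of the dict, so no KeyError.
def pvInnerA (vertex : Int) : List Int → PySem.Dict Int (PySem.Set Int) → Option (PySem.Dict Int (PySem.Set Int))
  | [], seen => some seen
  | neighbor :: rest, seen =>
    if vertex > neighbor then pvInnerA vertex rest seen
    else if (seen.getD vertex PySem.Set.empty).contains neighbor then none
    else pvInnerA vertex rest (seen.modify vertex PySem.Set.empty (fun s => s.add neighbor))

-- outer 'for vertex, neighbors in adjacency_list.items()' loop
def pvOuterA : List (Int × List Int) → PySem.Dict Int (PySem.Set Int) → Bool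
  | [], _ => false
  | p :: rest, seen =>
    match pvInnerA p.1 p.2 seen with
    | none => true
    | some seen' => pvOuterA rest seen'

def has_repeated_edges (adjacency_list : List (Int × List Int)) : Bool :=
  pvOuterA adjacency_list (pvInitA adjacency_list)

-- ===== PORT B =====
def has_repeated_edges_alt (adjacency_list : List (Int × List Int)) : Bool :=
  let edges : List (Int × Int) :=
    adjacency_list.foldl
      (fun acc p => p.2.foldl (fun acc n => if p.1 ≤ n then acc ++ [(p.1, n)] else acc) acc) []
  decide (edges.length ≠ (PySem.Set.ofList edges).length)

-- ===== PRECONDITION & SPEC =====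
def Spec_has_repeated_edges (adjacency_list : List (Int × List Int)) (out : Bool) : Prop := out = has_repeated_edges_alt adjacency_list
instance (adjacency_list : List (Int × List Int)) (out : Bool) : Decidable (Spec_has_repeated_edges adjacency_list out) := by unfold Spec_has_repeated_edges; infer_instance

-- ===== CLAIM (what is proved, stated in full; the proofs are below) =====
def Claim_equal_has_repeated_edges : Prop := ∀ (adjacency_list : List (Int × List Int)), Dom_has_repeated_edges adjacency_list → Spec_has_repeated_edges adjacency_list (has_repeated_edges adjacency_list)

-- ===== LEMMAS AND PROOFS =====

-- The normalized forward-edge stream both programs are about.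
def pvEdges (adjacency_list : List (Int × List Int)) : List (Int × Int) :=
  adjacency_list.flatMap (fun p => (p.2.filter (fun n => decide (p.1 ≤ n))).map (fun n => (p.1, n)))

-- A's whole computation, flattened to one scan over the edge stream.
def pvScan : List (Int × Int) → PySem.Dict Int (PySem.Set Int) → Bool
  | [], _ => false
  | e :: rest, seen =>
    if (seen.getD e.1 PySem.Set.empty).contains e.2 then true
    else pvScan rest (seen.modify e.1 PySem.Set.empty (fun s => s.add e.2))

theorem pvInnerA_scan (v : Int) (ns : List Int) (seen : PySem.Dict Int (PySem.Set Int))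
    (L : List (Int × Int)) :
    pvScan ((ns.filter (fun n => decide (v ≤ n))).map (fun n => (v, n)) ++ L) seen
      = match pvInnerA v ns seen with
        | none => true
        | some seen' => pvScan L seen' := by
  induction ns generalizing seen with
  | nil => simp [pvInnerA]
  | cons n rest ih =>
      by_cases h : v ≤ n
      · have hng : ¬ v > n := by omega
        simp only [pvInnerA, if_neg hng, List.filter_cons, decide_eq_true h]
        by_cases hm : n ∈ seen.getD v ([] : PySem.Set Int)
        · simp [pvScan, PySem.Set.empty, hm]
        · simp [pvScan, PySem.Set.empty, hm]
          exact ih _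
      · have hg : v > n := by omega
        simp only [pvInnerA, if_pos hg, List.filter_cons]
        simp [h, ih]

theorem pvOuterA_scan (items : List (Int × List Int)) (seen : PySem.Dict Int (PySem.Set Int)) :
    pvOuterA items seen = pvScan (pvEdges items) seen := by
  induction items generalizing seen with
  | nil => simp [pvOuterA, pvEdges, pvScan]
  | cons p rest ih =>
      simp only [pvOuterA, pvEdges, List.flatMap_cons]
      rw [show (rest.flatMap fun p => (p.2.filter (fun n => decide (p.1 ≤ n))).map (fun n => (p.1, n))) = pvEdges rest from rfl]
      rw [pvInnerA_scan p.1 p.2 seen (pvEdges rest)]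
      cases pvInnerA p.1 p.2 seen with
      | none => rfl
      | some seen' => exact ih seen'

theorem pvScan_iff (L : List (Int × Int)) (seen : PySem.Dict Int (PySem.Set Int)) :
    pvScan L seen = true ↔
      (∃ e ∈ L, ((seen.getD e.1 PySem.Set.empty).contains e.2) = true) ∨ ¬ L.Nodup := by
  induction L generalizing seen with
  | nil => simp [pvScan]
  | cons e rest ih =>
      simp only [pvScan]
      by_cases hc : (seen.getD e.1 PySem.Set.empty).contains e.2 = true
      · simp only [if_pos hc, true_iff]
        exact Or.inl ⟨e, List.mem_cons_self, hc⟩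
      · rw [if_neg hc, ih]
        constructor
        · rintro (⟨f, hf, hcf⟩ | hnd)
          · rw [PySem.Dict.getD_modify, PySem.Set.contains_iff] at hcf
            by_cases hfe : f.1 = e.1
            · rw [if_pos hfe, PySem.Set.mem_add] at hcf
              rcases hcf with hmem | heq
              · exact Or.inl ⟨f, List.mem_cons_of_mem _ hf,
                  by rw [hfe]; exact (PySem.Set.contains_iff _ _).mpr hmem⟩
              · right
                have : f = e := Prod.ext hfe heq
                subst this
                simp [List.nodup_cons, hf]
            · rw [if_neg hfe] at hcf
              exact Or.inl ⟨f, List.mem_cons_of_mem _ hf, (PySem.Set.contains_iff _ _).mpr hcf⟩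
          · right; simp [List.nodup_cons]; intro _; exact hnd
        · rintro (⟨f, hf, hcf⟩ | hnd)
          · rcases List.mem_cons.mp hf with rfl | hf'
            · exact absurd hcf hc
            · left
              refine ⟨f, hf', ?_⟩
              rw [PySem.Dict.getD_modify, PySem.Set.contains_iff]
              rw [PySem.Set.contains_iff] at hcf
              by_cases hfe : f.1 = e.1
              · rw [if_pos hfe]
                rw [hfe] at hcf
                exact (PySem.Set.mem_add _ _ _).mpr (Or.inl hcf)
              · rw [if_neg hfe]; exact hcf
          · rw [List.nodup_cons] at hnd
            push Not at hnd
            by_cases hmem : e ∈ rest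
            · left
              refine ⟨e, hmem, ?_⟩
              rw [PySem.Dict.getD_modify, PySem.Set.contains_iff, if_pos rfl,
                PySem.Set.mem_add]
              exact Or.inr rfl
            · right; exact hnd hmem

theorem pvInitA_getD (l : List (Int × List Int)) (d : PySem.Dict Int (PySem.Set Int))
    (h : ∀ v, d.getD v PySem.Set.empty = PySem.Set.empty) (v : Int) :
    (l.foldl (fun d p => d.insert p.1 PySem.Set.empty) d).getD v PySem.Set.empty
      = PySem.Set.empty := by
  induction l generalizing d with
  | nil => exact h v
  | cons p rest ih =>
      simp only [List.foldl_cons]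
      refine ih _ ?_
      intro w
      rw [PySem.Dict.getD_insert]
      split
      · rfl
      · exact h w

theorem pvOfList_sublist {α : Type} [BEq α] [LawfulBEq α] (l : List α) :
    List.Sublist (PySem.Set.ofList l) l := by
  induction l with
  | nil => simp [PySem.Set.ofList_nil]
  | cons x xs ih =>
      rw [PySem.Set.ofList_cons]
      refine List.Sublist.cons₂ _ ?_
      have h1 : List.Sublist (PySem.Set.discard (PySem.Set.ofList xs) x) (PySem.Set.ofList xs) := by
        simp [PySem.Set.discard]
      exact h1.trans ih

theorem pvOfList_length_iff {α : Type} [BEq α] [LawfulBEq α] (l : List α) :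
    (PySem.Set.ofList l).length = l.length ↔ l.Nodup := by
  constructor
  · intro h
    have heq := (pvOfList_sublist l).eq_of_length h
    rw [← heq]; exact PySem.Set.nodup_ofList l
  · intro h; rw [PySem.Set.ofList_eq_self_of_nodup l h]

theorem pvEdges_foldl (al : List (Int × List Int)) (acc : List (Int × Int)) :
    al.foldl
        (fun acc p => p.2.foldl (fun acc n => if p.1 ≤ n then acc ++ [(p.1, n)] else acc) acc) acc
      = acc ++ pvEdges al := by
  induction al generalizing acc with
  | nil => simp [pvEdges]
  | cons p rest ih =>
      simp only [List.foldl_cons]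
      have hinner : p.2.foldl (fun acc n => if p.1 ≤ n then acc ++ [(p.1, n)] else acc) acc
          = acc ++ (p.2.filter (fun n => decide (p.1 ≤ n))).map (fun n => (p.1, n)) := by
        have := PySem.List.foldl_append_if (fun n => decide (p.1 ≤ n))
          (fun n => ((p.1, n) : Int × Int)) p.2 acc
        simpa using this
      rw [hinner, ih]
      simp [pvEdges, List.flatMap_cons, List.append_assoc]

-- ===== VERDICT (by name: the statement is the Claim_ definition above) =====
theorem has_repeated_edges_spec : Claim_equal_has_repeated_edges := by
  unfold Claim_equal_has_repeated_edges Spec_has_repeated_edges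
  intro al _
  have hA : has_repeated_edges al = true ↔ ¬ (pvEdges al).Nodup := by
    rw [has_repeated_edges, pvOuterA_scan, pvScan_iff]
    constructor
    · rintro (⟨e, _, hc⟩ | h)
      · have h0 : (pvInitA al).getD e.1 PySem.Set.empty = PySem.Set.empty := by
          rw [pvInitA]; exact pvInitA_getD al PySem.Dict.empty (fun _ => rfl) e.1
        rw [h0] at hc
        exact absurd hc (by simp [PySem.Set.empty, PySem.Set.contains])
      · exact h
    · exact Or.inr
  have hB : has_repeated_edges_alt al = true ↔ ¬ (pvEdges al).Nodup := by
    rw [has_repeated_edges_alt]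
    simp only [pvEdges_foldl al [], List.nil_append, decide_eq_true_eq]
    rw [not_iff_not.mpr (pvOfList_length_iff (pvEdges al)).symm]
    exact ne_comm
  exact Bool.eq_iff_iff.mpr (hA.trans hB.symm)
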